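-- pv_equiv track=rewrite | github.com/Abdulrahman-Elsayed/Algorithmic-Toolbox | Algorithmic Toolbox/Week 3/largest_number.py | is_greater_or_equal
-- ===== SOURCE A (Python) =====
-- def is_greater_or_equal(a, b):
--     if a[0] > b[0]:
--         return True
--     elif a[0] == b[0]:
--         if len(a) == 1 and len(b) == 1:
--             return True
--         elif len(a) > len(b):
--             d = len(a) - len(b)
--             b += b[0] * d
--         else:
--             d = len(b) - len(a)
--             a += a[0] * d
--         return is_greater_or_equal(a[1:], b[1:])
--     else:
--         return False
-- ===== SOURCE B (Python) =====
-- def is_greater_or_equal(a, b):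
--     # Pad the shorter string with its own first character to equal length,
--     # then a single lexicographic comparison decides the whole thing.
--     if len(a) < len(b):
--         a = a + a[0] * (len(b) - len(a))
--     elif len(b) < len(a):
--         b = b + b[0] * (len(a) - len(b))
--     return a >= b
-- ===== Notes on version B (the rewrite author's own statement) =====
-- stated objective: faster
-- what changed: A's character-by-character recursion (slicing and re-padding at each step) is replaced by padding the shorter string once with its own first character and doing a single built-in lexicographic >= comparison.
import Mathlib
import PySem

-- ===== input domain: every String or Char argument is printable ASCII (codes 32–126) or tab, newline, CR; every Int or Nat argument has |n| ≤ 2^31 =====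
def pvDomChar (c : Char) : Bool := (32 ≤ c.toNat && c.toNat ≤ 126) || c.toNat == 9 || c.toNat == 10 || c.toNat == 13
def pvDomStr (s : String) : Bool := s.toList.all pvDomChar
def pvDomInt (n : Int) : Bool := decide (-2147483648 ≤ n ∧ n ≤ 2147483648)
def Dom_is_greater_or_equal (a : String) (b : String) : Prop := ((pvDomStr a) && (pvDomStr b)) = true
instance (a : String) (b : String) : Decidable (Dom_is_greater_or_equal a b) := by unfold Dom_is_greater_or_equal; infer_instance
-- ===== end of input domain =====

-- B replaces A's step-by-step recursion by one pad-to-equal-length plus a single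
-- lexicographic comparison (O(n) instead of A's repeated slicing).


-- ===== PORT A =====
-- Transliteration of A's recursion on List Char; the empty-list cases (where
-- Python raises IndexError on a[0]/b[0]) return false and are excluded by Pre_.
def igeAux : List Char → List Char → Bool
  | [], _ => false
  | _ :: _, [] => false
  | a0 :: ta, b0 :: tb =>
    if b0 < a0 then true                                   -- a[0] > b[0]
    else if a0 = b0 then
      if ta = [] ∧ tb = [] then true                       -- len(a) == 1 and len(b) == 1
      else if ta.length > tb.length then                   -- len(a) > len(b)
        -- b += b[0] * d; then recurse on a[1:], b[1:]
        igeAux ta (tb ++ List.replicate (ta.length - tb.length) b0)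
      else
        -- a += a[0] * d; then recurse on a[1:], b[1:]
        igeAux (ta ++ List.replicate (tb.length - ta.length) a0) tb
    else false
termination_by a b => max a.length b.length
decreasing_by
  · simp; omega
  · simp; omega

def is_greater_or_equal (a : String) (b : String) : Bool :=
  igeAux a.toList b.toList

-- ===== PORT B =====
-- Python's `a >= b` on str, transcribed exactly (code-point lexicographic,
-- prefix counts as smaller): exact on all strings.
def strGe : List Char → List Char → Bool
  | _, [] => true
  | [], _ :: _ => false
  | x :: xs, y :: ys => if x = y then strGe xs ys else decide (y < x)

def is_greater_or_equal_alt (a : String) (b : String) : Bool :=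
  let la := a.toList
  let lb := b.toList
  -- pad the shorter side with its own first character (headD unreachable default:
  -- Python Source B raises there, excluded by Pre_)
  let la' := if la.length < lb.length then la ++ List.replicate (lb.length - la.length) (la.headD ' ') else la
  let lb' := if lb.length < la.length then lb ++ List.replicate (la.length - lb.length) (lb.headD ' ') else lb
  strGe la' lb'

-- ===== PRECONDITION & SPEC =====
-- A evaluates a[0] and b[0]: it raises IndexError iff a or b is empty.
def Pre_is_greater_or_equal (a : String) (b : String) : Prop := a ≠ "" ∧ b ≠ ""
instance (a : String) (b : String) : Decidable (Pre_is_greater_or_equal a b) := by unfold Pre_is_greater_or_equal; infer_instance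
def pvWitness_is_greater_or_equal : String × String := ("4343", "43")

def Spec_is_greater_or_equal (a : String) (b : String) (out : Bool) : Prop := out = is_greater_or_equal_alt a b
instance (a : String) (b : String) (out : Bool) : Decidable (Spec_is_greater_or_equal a b out) := by unfold Spec_is_greater_or_equal; infer_instance

-- ===== CLAIM (what is proved, stated in full; the proofs are below) =====
def Claim_equal_is_greater_or_equal : Prop := ∀ (a : String) (b : String), Dom_is_greater_or_equal a b → Pre_is_greater_or_equal a b → Spec_is_greater_or_equal a b (is_greater_or_equal a b)

-- ===== LEMMAS AND PROOFS =====

-- On equal-length nonempty lists A's recursion is exactly lexicographic >=.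
theorem igeAux_eq_strGe (a b : List Char) (hlen : a.length = b.length) (hne : a ≠ []) :
    igeAux a b = strGe a b := by
  induction a generalizing b with
  | nil => exact absurd rfl hne
  | cons a0 ta ih =>
    cases b with
    | nil => simp at hlen
    | cons b0 tb =>
      simp only [List.length_cons, Nat.add_right_cancel_iff] at hlen
      by_cases h1 : b0 < a0
      · have hne' : a0 ≠ b0 := fun h => absurd (h ▸ h1) (lt_irrefl _)
        simp [igeAux, strGe, h1, hne']
      · by_cases h2 : a0 = b0
        · by_cases h3 : ta = []
          · have htb : tb = [] := by
              cases tb with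
              | nil => rfl
              | cons _ _ => subst h3; simp at hlen
            simp [igeAux, strGe, h2, h3, htb]
          · have hta' : ¬ (ta = [] ∧ tb = []) := fun h => h3 h.1
            have hgt : ¬ ta.length > tb.length := by omega
            have : igeAux (a0 :: ta) (b0 :: tb)
                = igeAux (ta ++ List.replicate (tb.length - ta.length) a0) tb := by
              simp [igeAux, h2, hta', hgt]
            rw [this]
            have hz : tb.length - ta.length = 0 := by omega
            rw [hz, List.replicate_zero, List.append_nil]
            simp [strGe, h2, ih tb hlen h3]
        · simp [igeAux, strGe, h1, h2]


theorem is_greater_or_equal_spec : Claim_equal_is_greater_or_equal := by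
  intro a b _ hpre
  unfold Spec_is_greater_or_equal is_greater_or_equal is_greater_or_equal_alt
  obtain ⟨ha, hb⟩ := hpre
  have hal : a.toList ≠ [] := fun h => ha (String.toList_eq_nil_iff.mp h)
  have hbl : b.toList ≠ [] := fun h => hb (String.toList_eq_nil_iff.mp h)
  generalize a.toList = la at hal
  generalize b.toList = lb at hbl
  cases la with
  | nil => exact absurd rfl hal
  | cons a0 ta =>
  cases lb with
  | nil => exact absurd rfl hbl
  | cons b0 tb =>
  simp only [List.headD_cons]
  rcases Nat.lt_trichotomy (a0 :: ta).length (b0 :: tb).length with hlt | heq | hgt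
  · -- a shorter: B pads a
    have hd : (b0 :: tb).length - (a0 :: ta).length = tb.length - ta.length := by simp
    rw [if_pos hlt, if_neg (by omega), hd, List.cons_append]
    simp only [List.length_cons] at hlt
    by_cases h1 : b0 < a0
    · have hne' : a0 ≠ b0 := fun h => absurd (h ▸ h1) (lt_irrefl _)
      simp [igeAux, strGe, h1, hne']
    · by_cases h2 : a0 = b0
      · have hta' : ¬ (ta = [] ∧ tb = []) := by rintro ⟨h3, h4⟩; simp [h3, h4] at hlt
        have hgt' : ¬ ta.length > tb.length := by omega
        have htbne : tb ≠ [] := by intro h; simp [h] at hlt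
        have hlen : (ta ++ List.replicate (tb.length - ta.length) a0).length = tb.length := by
          simp; omega
        have hne2 : ta ++ List.replicate (tb.length - ta.length) a0 ≠ [] := by
          intro h; rw [h] at hlen; simp at hlen; exact htbne (List.eq_nil_of_length_eq_zero hlen.symm)
        simp only [igeAux, strGe]
        rw [if_neg h1, if_pos h2, if_neg hta', if_neg hgt', if_pos h2]
        exact igeAux_eq_strGe _ _ hlen hne2
      · simp [igeAux, strGe, h1, h2]
  · -- equal lengths: no padding
    rw [if_neg (by omega), if_neg (by omega)]
    exact igeAux_eq_strGe _ _ heq (by simp)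
  · -- b shorter: B pads b
    have hd : (a0 :: ta).length - (b0 :: tb).length = ta.length - tb.length := by simp
    rw [if_neg (by omega), if_pos hgt, hd, List.cons_append]
    simp only [List.length_cons] at hgt
    by_cases h1 : b0 < a0
    · have hne' : a0 ≠ b0 := fun h => absurd (h ▸ h1) (lt_irrefl _)
      simp [igeAux, strGe, h1, hne']
    · by_cases h2 : a0 = b0
      · have hta' : ¬ (ta = [] ∧ tb = []) := by rintro ⟨h3, h4⟩; simp [h3, h4] at hgt
        have hgt' : ta.length > tb.length := by omega
        have htane : ta ≠ [] := by intro h; simp [h] at hgt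
        have hlen : ta.length = (tb ++ List.replicate (ta.length - tb.length) b0).length := by
          simp; omega
        simp only [igeAux, strGe]
        rw [if_neg h1, if_pos h2, if_neg hta', if_pos hgt', if_pos h2]
        exact igeAux_eq_strGe _ _ hlen htane
      · simp [igeAux, strGe, h1, h2]
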